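-- pv_equiv track=rewrite | github.com/SlightlyOffset/PSCP_Problems | Orange.py | remaining_layers
-- ===== SOURCE A (Python) =====
-- def remaining_layers(total_layer, saled):
--     """ to calculate orange """
--     layers = []
--
--     for i in range(1, total_layer + 1):
--         layers.append(i * i)
--
--     for i in range(total_layer):
--         if saled >= layers[i]:
--             saled -= layers[i]
--         else:
--             return total_layer - i
--
--     return 0
-- ===== SOURCE B (Python) =====
-- def remaining_layers(total_layer, saled):
--     """ to calculate orange (binary search on the closed-form prefix sum of squares) """
--     def prefix(k):
--         return k * (k + 1) * (2 * k + 1) // 6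
--
--     if saled < 0:
--         k = 0
--     else:
--         lo, hi = 0, saled + 1
--         while hi - lo > 1:
--             mid = (lo + hi) // 2
--             if prefix(mid) <= saled:
--                 lo = mid
--             else:
--                 hi = mid
--         k = lo
--     return total_layer - k if k < total_layer else 0
-- ===== Notes on version B (the rewrite author's own statement) =====
-- stated objective: faster
-- what changed: A builds the list of squares and scans it layer by layer subtracting from saled; B binary-searches for the largest k with k(k+1)(2k+1)/6 <= saled using the closed-form prefix sum and returns max(total_layer - k, 0) without building any list.
import Mathlib
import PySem

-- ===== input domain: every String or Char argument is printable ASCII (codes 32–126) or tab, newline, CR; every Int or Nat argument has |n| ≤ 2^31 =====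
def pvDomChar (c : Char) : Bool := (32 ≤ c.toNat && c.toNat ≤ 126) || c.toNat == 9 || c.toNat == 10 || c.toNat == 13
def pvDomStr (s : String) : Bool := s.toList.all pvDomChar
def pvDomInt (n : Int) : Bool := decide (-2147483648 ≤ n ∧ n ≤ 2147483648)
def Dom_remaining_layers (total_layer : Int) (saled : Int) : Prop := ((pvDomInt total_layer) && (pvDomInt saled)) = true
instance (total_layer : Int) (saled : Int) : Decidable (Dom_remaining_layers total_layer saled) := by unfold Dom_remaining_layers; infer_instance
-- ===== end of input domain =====

-- B replaces A's linear scan over the layer list by a binary search on the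
-- closed-form prefix sum k(k+1)(2k+1)/6 (objective: faster, asymptotic).

-- ===== PORT A =====
-- second loop of A, with early return 'total_layer - i'; layers[i] is always
-- in range when called from remaining_layers, so pyGetD with default 0 is exact
def goA (t : Int) (layers : List Int) : List Int → Int → Int
  | [], _ => 0
  | i :: rest, s =>
      let li := PySem.List.pyGetD layers i 0
      if s ≥ li then goA t layers rest (s - li) else t - i

def remaining_layers (total_layer : Int) (saled : Int) : Int :=
  let layers := (PySem.List.pyRange 1 (total_layer + 1) 1).map (fun i => i * i)
  goA total_layer layers (PySem.List.pyRange 0 total_layer 1) saled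

-- ===== PORT B =====
-- prefix(k) = k*(k+1)*(2*k+1) // 6
def prefixS (k : Int) : Int := PySem.Int.floordiv (k * (k + 1) * (2 * k + 1)) 6

-- the while-loop of B: binary search for the largest k with prefix(k) ≤ s;
-- the fuel argument ((hi - lo).toNat at the call site) only makes the loop
-- total — the gap shrinks every iteration, so it is never exhausted
def bsearchB (s : Int) : Nat → Int → Int → Int
  | 0, lo, _ => lo
  | fuel + 1, lo, hi =>
      if hi - lo > 1 then
        if prefixS (PySem.Int.floordiv (lo + hi) 2) ≤ s then
          bsearchB s fuel (PySem.Int.floordiv (lo + hi) 2) hi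
        else bsearchB s fuel lo (PySem.Int.floordiv (lo + hi) 2)
      else lo

def remaining_layers_alt (total_layer : Int) (saled : Int) : Int :=
  let k := if saled < 0 then 0 else bsearchB saled (saled + 1 - 0).toNat 0 (saled + 1)
  if k < total_layer then total_layer - k else 0

-- ===== PRECONDITION & SPEC =====
def Spec_remaining_layers (total_layer : Int) (saled : Int) (out : Int) : Prop := out = remaining_layers_alt total_layer saled
instance (total_layer : Int) (saled : Int) (out : Int) : Decidable (Spec_remaining_layers total_layer saled out) := by unfold Spec_remaining_layers; infer_instance

-- ===== CLAIM (what is proved, stated in full; the proofs are below) =====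
def Claim_equal_remaining_layers : Prop := ∀ (total_layer : Int) (saled : Int), Dom_remaining_layers total_layer saled → Spec_remaining_layers total_layer saled (remaining_layers total_layer saled)

-- ===== LEMMAS AND PROOFS =====

-- sum of squares 1² + … + n²
def SS : Nat → Int
  | 0 => 0
  | n + 1 => SS n + ((n : Int) + 1) ^ 2

lemma six_SS (n : Nat) : 6 * SS n = (n : Int) * ((n : Int) + 1) * (2 * (n : Int) + 1) := by
  induction n with
  | zero => simp [SS]
  | succ n ih =>
      simp only [SS]
      push_cast
      linear_combination ih

lemma prefixS_eq (k : Int) (hk : 0 ≤ k) : prefixS k = SS k.toNat := by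
  obtain ⟨n, rfl⟩ := Int.eq_ofNat_of_zero_le hk
  unfold prefixS
  rw [PySem.Int.floordiv_eq_ediv_of_pos (by norm_num : (0:Int) < 6)]
  have h := six_SS n
  simp only [Int.toNat_natCast]
  rw [show ((n : Int) * ((n : Int) + 1) * (2 * (n : Int) + 1)) = 6 * SS n from h.symm]
  exact Int.mul_ediv_cancel_left _ (by norm_num)

lemma SS_lt_succ (n : Nat) : SS n < SS (n + 1) := by
  have : (0:Int) < ((n : Int) + 1) ^ 2 := by positivity
  simp only [SS]; linarith

lemma SS_strictMono : StrictMono SS := strictMono_nat_of_lt_succ SS_lt_succ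

lemma SS_ge_self (n : Nat) : (n : Int) ≤ SS n := by
  induction n with
  | zero => simp [SS]
  | succ n ih =>
      simp only [SS]
      push_cast
      nlinarith [sq_nonneg ((n : Int) + 1), ih]

lemma bsearchB_spec (s : Int) :
    ∀ (fuel : Nat) (lo hi : Int), (hi - lo).toNat ≤ fuel → 0 ≤ lo → lo < hi →
      SS lo.toNat ≤ s → s < SS hi.toNat →
      0 ≤ bsearchB s fuel lo hi ∧ SS (bsearchB s fuel lo hi).toNat ≤ s ∧
        s < SS ((bsearchB s fuel lo hi).toNat + 1) := by
  intro fuel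
  induction fuel with
  | zero => intro lo hi hn hlo hlt h1 h2; omega
  | succ fuel ih =>
    intro lo hi hn hlo hlt h1 h2
    rw [bsearchB]
    by_cases hgap : hi - lo > 1
    · simp only [hgap, if_true]
      set mid := PySem.Int.floordiv (lo + hi) 2 with hmiddef
      have hmid : mid = (lo + hi) / 2 := by
        rw [hmiddef]; exact PySem.Int.floordiv_eq_ediv_of_pos (by norm_num)
      have hb1 : lo < mid := by omega
      have hb2 : mid < hi := by omega
      have hmid0 : 0 ≤ mid := le_of_lt (lt_of_le_of_lt hlo hb1)
      rw [prefixS_eq mid hmid0]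
      by_cases hc : SS mid.toNat ≤ s
      · simp only [hc, if_true]
        exact ih mid hi (by omega) hmid0 hb2 hc h2
      · simp only [hc, if_false]
        exact ih lo mid (by omega) hlo hb1 h1 (not_le.mp hc)
    · simp only [hgap, if_false]
      have hhi : hi.toNat = lo.toNat + 1 := by omega
      refine ⟨hlo, h1, ?_⟩
      rw [hhi] at h2; exact h2

lemma SS_le_iff (s : Int) (kk j : Nat) (hk1 : SS kk ≤ s) (hk2 : s < SS (kk + 1)) :
    SS (j + 1) ≤ s ↔ j + 1 ≤ kk := by
  constructor
  · intro h
    by_contra hj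
    have : kk + 1 ≤ j + 1 := by omega
    have := SS_strictMono.monotone this
    linarith
  · intro h
    exact le_trans (SS_strictMono.monotone h) hk1

lemma goA_run (t s : Int) (kk : Nat) (hk1 : SS kk ≤ s) (hk2 : s < SS (kk + 1)) :
    ∀ (n : Nat) (j : Nat), (t - (j : Int)).toNat = n → (j : Int) ≤ t → j ≤ kk →
      goA t ((PySem.List.pyRange 1 (t + 1) 1).map (fun i => i * i))
        (PySem.List.pyRange (j : Int) t 1) (s - SS j) =
      if (kk : Int) < t then t - (kk : Int) else 0 := by
  intro n
  induction n with
  | zero =>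
      intro j hn hjt hjk
      have hjt' : t = (j : Int) := by omega
      rw [PySem.List.pyRange_one_eq_nil (show t ≤ (j : Int) by omega)]
      simp only [goA]
      have hnlt : ¬ ((kk : Int) < t) := by omega
      simp [hnlt]
  | succ n ihn =>
      intro j hn hjt hjk
      have hjlt : (j : Int) < t := by omega
      rw [PySem.List.pyRange_one_cons hjlt]
      simp only [goA]
      have hget : PySem.List.pyGetD
          ((PySem.List.pyRange 1 (t + 1) 1).map (fun i => i * i)) (j : Int) 0 =
          (1 + (j : Int)) * (1 + (j : Int)) := by
        have hj : j < ((t + 1) - 1).toNat := by omega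
        exact PySem.List.pyGetD_map_pyRange_one (fun i => i * i) 1 (t + 1) j 0 hj
      rw [hget]
      have hSSsucc : SS (j + 1) = SS j + ((j : Int) + 1) ^ 2 := rfl
      by_cases hc : s - SS j ≥ (1 + (j : Int)) * (1 + (j : Int))
      · simp only [hc, if_true]
        have hnext : SS (j + 1) ≤ s := by rw [hSSsucc]; ring_nf; ring_nf at hc; linarith
        have hjk' : j + 1 ≤ kk := (SS_le_iff s kk j hk1 hk2).mp hnext
        have := ihn (j + 1) (by push_cast; omega) (by push_cast; omega) hjk'
        push_cast at this
        rw [show s - SS j - (1 + (j : Int)) * (1 + (j : Int)) = s - SS (j + 1) by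
          rw [hSSsucc]; ring]
        exact this
      · simp only [hc, if_false]
        have hnot : ¬ (j + 1 ≤ kk) := by
          intro h
          exact hc (by
            have := (SS_le_iff s kk j hk1 hk2).mpr h
            rw [hSSsucc] at this; nlinarith)
        have hjeq : j = kk := by omega
        subst hjeq
        simp [hjlt]

theorem remaining_layers_eq (t s : Int) :
    remaining_layers t s = remaining_layers_alt t s := by
  by_cases hs : s < 0
  · simp only [remaining_layers, remaining_layers_alt, hs, if_true]
    by_cases ht : 0 < t
    · rw [PySem.List.pyRange_one_cons ht]
      simp only [goA]
      have hget : PySem.List.pyGetD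
          ((PySem.List.pyRange 1 (t + 1) 1).map (fun i => i * i))
          (0 : Int) 0 = 1 := by
        have h0 : (0 : Nat) < ((t + 1) - 1).toNat := by omega
        have := PySem.List.pyGetD_map_pyRange_one (fun i => i * i) 1 (t + 1) 0 0 h0
        simpa using this
      rw [hget]
      have : ¬ (s ≥ (1 : Int)) := by omega
      simp [this, ht]
    · rw [PySem.List.pyRange_one_eq_nil (show t + 1 ≤ (1:Int) by omega),
          PySem.List.pyRange_one_eq_nil (show t ≤ (0:Int) by omega)]
      simp [goA, ht]
  · have hs' : 0 ≤ s := not_lt.mp hs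
    have hinit2 : s < SS (s + 1).toNat := by
      have h1 : (s + 1).toNat = s.toNat + 1 := by omega
      rw [h1]
      have := SS_ge_self (s.toNat + 1)
      push_cast at this
      omega
    obtain ⟨hk0, hk1, hk2⟩ := bsearchB_spec s (s + 1 - 0).toNat 0 (s + 1) le_rfl
      le_rfl (by omega) (by simp [SS]; exact hs') hinit2
    set k := bsearchB s (s + 1 - 0).toNat 0 (s + 1) with hkdef
    have hcast : ((k.toNat : Int)) = k := Int.toNat_of_nonneg hk0
    simp only [remaining_layers, remaining_layers_alt, hs, if_false, ← hkdef]
    by_cases ht : 0 ≤ t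
    · have := goA_run t s k.toNat hk1 hk2 (t - 0).toNat 0 (by simp) (by exact_mod_cast ht)
        (Nat.zero_le _)
      simp only [Nat.cast_zero, SS, sub_zero] at this
      rw [this, hcast]
    · rw [PySem.List.pyRange_one_eq_nil (show t + 1 ≤ (1:Int) by omega),
          PySem.List.pyRange_one_eq_nil (show t ≤ (0:Int) by omega)]
      simp only [goA]
      have : ¬ (k < t) := by omega
      simp [this]

-- ===== VERDICT (by name: the statement is the Claim_ definition above) =====
theorem remaining_layers_spec : Claim_equal_remaining_layers := by
  intro t s _
  unfold Spec_remaining_layers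
  exact remaining_layers_eq t s
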